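-- pv_equiv track=rewrite | github.com/Mark-A-Williams/advent-of-code-2020 | day12.py | getRotatedWaypointPosition
-- ===== SOURCE A (Python) =====
-- from typing import List
--
-- def getRotatedWaypointPosition(waypointCoords: List[int], shipCoords: List[int], code: str, value: int) -> List[int]:
--     if len(waypointCoords) != 2 or len(shipCoords) != 2:
--         raise Exception("Invalid turn")
--
--     newVectorToWaypoint: List[int] = []
--     if value == 180:
--         newVectorToWaypoint = list(map(lambda x: x * -1, waypointCoords))
--     elif value == 270:
--         value = 90
--         newCode: str = None
--         if code == "L":
--             newCode = "R"
--         if code == "R":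
--             newCode = "L"
--         newVectorToWaypoint = getRotatedWaypointPosition(waypointCoords, shipCoords, newCode, value)
--     elif value == 90:
--         if code == "L":
--             newVectorToWaypoint = [- waypointCoords[1], waypointCoords[0]]
--         elif code == "R":
--             newVectorToWaypoint = [waypointCoords[1], - waypointCoords[0]]
--
--     return newVectorToWaypoint
-- ===== SOURCE B (Python) =====
-- from typing import List
--
-- def getRotatedWaypointPosition(waypointCoords: List[int], shipCoords: List[int], code: str, value: int) -> List[int]:
--     if len(waypointCoords) != 2 or len(shipCoords) != 2:
--         raise Exception("Invalid turn")
--     x, y = waypointCoords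
--     if value == 180:
--         return [-x, -y]
--     if (value, code) in ((90, "L"), (270, "R")):
--         return [-y, x]
--     if (value, code) in ((90, "R"), (270, "L")):
--         return [y, -x]
--     return []
-- ===== Notes on version B (the rewrite author's own statement) =====
-- stated objective: simpler
-- what changed: Replaces A's one-level recursion (270 rewritten as 90 with the code flipped via a None-able newCode) and the mutable accumulator with flat non-recursive branching: unpack the pair once and return the rotated pair in closed form per (value, code) case, with [] as the single fall-through.
import Mathlib
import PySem

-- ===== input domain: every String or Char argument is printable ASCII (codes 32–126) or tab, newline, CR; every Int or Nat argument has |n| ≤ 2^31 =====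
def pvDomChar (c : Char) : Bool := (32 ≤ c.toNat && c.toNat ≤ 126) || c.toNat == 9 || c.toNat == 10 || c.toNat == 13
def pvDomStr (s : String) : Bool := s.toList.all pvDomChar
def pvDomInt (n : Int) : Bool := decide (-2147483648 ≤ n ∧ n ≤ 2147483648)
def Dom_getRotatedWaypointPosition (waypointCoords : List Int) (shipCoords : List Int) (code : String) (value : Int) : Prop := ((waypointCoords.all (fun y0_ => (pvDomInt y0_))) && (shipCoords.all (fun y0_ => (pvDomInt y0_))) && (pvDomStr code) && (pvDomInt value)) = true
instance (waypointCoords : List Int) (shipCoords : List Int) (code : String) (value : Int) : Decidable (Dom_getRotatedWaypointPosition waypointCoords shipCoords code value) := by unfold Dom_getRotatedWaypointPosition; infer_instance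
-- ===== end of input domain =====

-- B replaces A's one-level recursion for value==270 with flat closed-form branching on (value, code); same return value, same Exception on bad lengths (excluded by Pre_).
-- ===== PORT A =====
-- A recurses for value == 270 with the code flipped; the recursive call may pass a None
-- code (Python's newCode stays None when code is neither "L" nor "R"), so the helper
-- carries the code as Option String; None compares unequal to "L"/"R", as in Python.
def getRotA (waypointCoords : List Int) (shipCoords : List Int) (code : Option String) (value : Int) : List Int :=
  if waypointCoords.length ≠ 2 ∨ shipCoords.length ≠ 2 then
    []  -- Python raises Exception "Invalid turn" here; excluded by Pre_
  else if value = 180 then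
    waypointCoords.map (fun x => x * -1)
  else if value = 270 then
    let newCode : Option String :=
      if code = some "L" then some "R"
      else if code = some "R" then some "L"
      else none
    getRotA waypointCoords shipCoords newCode 90
  else if value = 90 then
    if code = some "L" then
      [- (PySem.List.pyGetD waypointCoords 1 0), PySem.List.pyGetD waypointCoords 0 0]
    else if code = some "R" then
      [PySem.List.pyGetD waypointCoords 1 0, - (PySem.List.pyGetD waypointCoords 0 0)]
    else []
  else []
termination_by (if value = 270 then 1 else 0)
decreasing_by simp_all

def getRotatedWaypointPosition (waypointCoords : List Int) (shipCoords : List Int) (code : String) (value : Int) : List Int :=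
  getRotA waypointCoords shipCoords (some code) value

-- ===== PORT B =====
def getRotatedWaypointPosition_alt (waypointCoords : List Int) (shipCoords : List Int) (code : String) (value : Int) : List Int :=
  match waypointCoords, shipCoords with
  | [x, y], [_, _] =>
    if value = 180 then [-x, -y]
    else if (value = 90 ∧ code = "L") ∨ (value = 270 ∧ code = "R") then [-y, x]
    else if (value = 90 ∧ code = "R") ∨ (value = 270 ∧ code = "L") then [y, -x]
    else []
  | _, _ => []  -- Python raises here; excluded by Pre_

-- ===== PRECONDITION & SPEC =====
-- Pre_ excludes exactly the inputs where A raises Exception("Invalid turn"): list lengths ≠ 2.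
def Pre_getRotatedWaypointPosition (waypointCoords : List Int) (shipCoords : List Int) (code : String) (value : Int) : Prop :=
  waypointCoords.length = 2 ∧ shipCoords.length = 2
instance (waypointCoords : List Int) (shipCoords : List Int) (code : String) (value : Int) : Decidable (Pre_getRotatedWaypointPosition waypointCoords shipCoords code value) := by unfold Pre_getRotatedWaypointPosition; infer_instance
def pvWitness_getRotatedWaypointPosition : List Int × List Int × String × Int := ([3, 7], [1, 2], "L", 90)
def Spec_getRotatedWaypointPosition (waypointCoords : List Int) (shipCoords : List Int) (code : String) (value : Int) (out : List Int) : Prop := out = getRotatedWaypointPosition_alt waypointCoords shipCoords code value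
instance (waypointCoords : List Int) (shipCoords : List Int) (code : String) (value : Int) (out : List Int) : Decidable (Spec_getRotatedWaypointPosition waypointCoords shipCoords code value out) := by unfold Spec_getRotatedWaypointPosition; infer_instance

-- ===== CLAIM (what is proved, stated in full; the proofs are below) =====
def Claim_equal_getRotatedWaypointPosition : Prop := ∀ (waypointCoords : List Int) (shipCoords : List Int) (code : String) (value : Int), Dom_getRotatedWaypointPosition waypointCoords shipCoords code value → Pre_getRotatedWaypointPosition waypointCoords shipCoords code value → Spec_getRotatedWaypointPosition waypointCoords shipCoords code value (getRotatedWaypointPosition waypointCoords shipCoords code value)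

-- ===== LEMMAS AND PROOFS =====

-- ===== VERDICT (by name: the statement is the Claim_ definition above) =====
theorem getRotatedWaypointPosition_spec : Claim_equal_getRotatedWaypointPosition := by
  intro wc sc code value _ hpre
  obtain ⟨hw, hs⟩ := hpre
  match wc, hw, sc, hs with
  | [x, y], _, [a, b], _ =>
    unfold Spec_getRotatedWaypointPosition getRotatedWaypointPosition getRotatedWaypointPosition_alt
    rw [getRotA]
    by_cases h180 : value = 180
    · simp [h180]
    · by_cases h270 : value = 270
      · rw [getRotA]
        by_cases hL : code = "L" <;> by_cases hR : code = "R" <;>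
          simp_all [PySem.List.pyGetD]
      · by_cases h90 : value = 90
        · by_cases hL : code = "L" <;> by_cases hR : code = "R" <;>
            simp_all [PySem.List.pyGetD]
        · simp [h180, h270, h90]
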